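-- pv_equiv track=rewrite | github.com/SHANExiang/python | test.py | reverseStr2
-- ===== SOURCE A (Python) =====
-- def reverseStr2(s: str, k: int) -> str:
--     """
--     1. 使用range(start, end, step)来确定需要调换的初始位置
--     2. 对于字符串s = 'abc'，如果使用s[0:999] ===> 'abc'。字符串末尾如果超过最大长度，则会返回至字符串最后一个值，这个特性可以避免一些边界条件的处理。
--     3. 用切片整体替换，而不是一个个替换.
--     """
--
--     def reverse_substring(text):
--         left, right = 0, len(text) - 1
--         while left < right:
--             text[left], text[right] = text[right], text[left]
--             left += 1
--             right -= 1
--         return text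
--
--     res = list(s)
--
--     for cur in range(0, len(s), 2 * k):
--         res[cur: cur + k] = reverse_substring(res[cur: cur + k])
--
--     return ''.join(res)
-- ===== SOURCE B (Python) =====
-- def reverseStr2(s: str, k: int) -> str:
--     pieces = [s[i:i + k][::-1] + s[i + k:i + 2 * k] for i in range(0, len(s), 2 * k)]
--     return ''.join(pieces)
-- ===== Notes on version B (the rewrite author's own statement) =====
-- stated objective: idiomatic
-- what changed: Replaces the in-place buffer with two-pointer swap helper and slice assignment by assembling the result from fresh slices: one comprehension builds each block as s[i:i+k][::-1] + s[i+k:i+2k] and ''.join concatenates them.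
-- outside the precondition, e.g. on reverseStr2('ab', -1): A returns 'ab', B returns ''
import Mathlib
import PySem

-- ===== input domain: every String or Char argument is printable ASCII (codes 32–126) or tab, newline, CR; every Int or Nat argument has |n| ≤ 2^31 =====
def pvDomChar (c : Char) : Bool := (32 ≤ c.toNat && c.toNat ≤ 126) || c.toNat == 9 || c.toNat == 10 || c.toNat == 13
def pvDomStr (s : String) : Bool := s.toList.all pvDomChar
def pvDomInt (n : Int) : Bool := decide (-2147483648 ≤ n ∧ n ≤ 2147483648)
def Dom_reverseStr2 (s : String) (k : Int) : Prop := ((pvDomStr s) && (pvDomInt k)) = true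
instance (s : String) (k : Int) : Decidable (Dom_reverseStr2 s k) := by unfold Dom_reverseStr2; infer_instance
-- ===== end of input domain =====

-- B replaces A's in-place buffer mutation (two-pointer swap helper + slice assignment)
-- by assembling fresh slices per 2k-block and joining them.

-- ===== PORT A =====
-- while left < right: swap text[left], text[right]; left += 1; right -= 1
-- (indices stay in 0 ≤ left < right ≤ len-1, so Nat indexing with getD default is exact here)
def swapLoop (t : List Char) (l r : Nat) : List Char :=
  if _h : l < r then
    swapLoop ((t.set l (t.getD r ' ')).set r (t.getD l ' ')) (l + 1) (r - 1)
  else t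
termination_by r - l
decreasing_by omega

-- def reverse_substring(text): two-pointer swap, left = 0, right = len(text) - 1
-- (for empty text Python has right = -1 and the while guard is false, exactly as 0 < 0 is here)
def reverseSubstring (t : List Char) : List Char := swapLoop t 0 (t.length - 1)

-- res[cur:cur+k] = v  with 0 ≤ cur (true for every cur produced by the loop's range):
-- Python's slice assignment is res[:cur] ++ v ++ res[cur+k:] with clamped bounds, exact here.
def sliceAssignRev (res : List Char) (cur k : Int) : List Char :=
  PySem.List.slice res (some 0) (some cur)
    ++ reverseSubstring (PySem.List.slice res (some cur) (some (cur + k)))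
    ++ PySem.List.slice res (some (cur + k)) none

def reverseStr2 (s : String) (k : Int) : String :=
  String.ofList ((PySem.List.pyRange 0 s.toList.length (2 * k)).foldl
    (fun res cur => sliceAssignRev res cur k) s.toList)

-- ===== PORT B =====
-- s[i:i+k][::-1] + s[i+k:i+2*k]; [::-1] is List.reverse (PySem.List.slice?_none_none_neg_one)
def pieceB (cs : List Char) (k i : Int) : List Char :=
  (PySem.List.slice cs (some i) (some (i + k))).reverse
    ++ PySem.List.slice cs (some (i + k)) (some (i + 2 * k))

def reverseStr2_alt (s : String) (k : Int) : String :=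
  String.ofList (((PySem.List.pyRange 0 s.toList.length (2 * k)).map (pieceB s.toList k)).flatten)

-- ===== PRECONDITION & SPEC =====
-- Pre_ restricts to the function's natural domain k ≥ 1: for k = 0 A raises
-- ValueError (zero range step); for k < 0 the loop body never runs and A returns s
-- unchanged — an unspecified corner, where B naturally returns ''.
def Pre_reverseStr2 (s : String) (k : Int) : Prop := 1 ≤ k
instance (s : String) (k : Int) : Decidable (Pre_reverseStr2 s k) := by unfold Pre_reverseStr2; infer_instance
def pvWitness_reverseStr2 : String × Int := ("abcdefg", 2)

def Spec_reverseStr2 (s : String) (k : Int) (out : String) : Prop := out = reverseStr2_alt s k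
instance (s : String) (k : Int) (out : String) : Decidable (Spec_reverseStr2 s k out) := by unfold Spec_reverseStr2; infer_instance

-- ===== CLAIM (what is proved, stated in full; the proofs are below) =====
def Claim_equal_reverseStr2 : Prop := ∀ (s : String) (k : Int), Dom_reverseStr2 s k → Pre_reverseStr2 s k → Spec_reverseStr2 s k (reverseStr2 s k)

-- ===== LEMMAS AND PROOFS =====

-- block spec both programs are shown to compute: per 2k-block, reversed first k ++ next k
-- (kn is the block size; for kn ≥ 1 the recursive call is on (c :: t).drop (2*kn))
def gB (kn : Nat) : List Char → List Char
  | [] => []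
  | c :: t => ((c :: t).take kn).reverse ++ ((c :: t).drop kn).take kn ++ gB kn (t.drop (2 * kn - 1))
termination_by t => t.length
decreasing_by simp [List.length_drop]

lemma length_swapLoop (t : List Char) (l r : Nat) : (swapLoop t l r).length = t.length := by
  induction t, l, r using swapLoop.induct with
  | case1 t l r h ih => rw [swapLoop]; simp only [dif_pos h]; rw [ih]; simp
  | case2 t l r h => rw [swapLoop]; simp [h]

lemma swapLoop_getD (t : List Char) (l r : Nat) (hr : r < t.length) (i : Nat) :
    (swapLoop t l r).getD i ' ' =
      if l ≤ i ∧ i ≤ r then t.getD (l + r - i) ' ' else t.getD i ' ' := by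
  induction t, l, r using swapLoop.induct with
  | case2 t l r h =>
    rw [swapLoop, dif_neg h]
    split_ifs with hif
    · have : l + r - i = i := by omega
      rw [this]
    · rfl
  | case1 t l r h ih =>
    rw [swapLoop, dif_pos h]
    rw [ih (by simp; omega)]
    have hset : ∀ j, ((t.set l (t.getD r ' ')).set r (t.getD l ' ')).getD j ' ' =
        if r = j then t.getD l ' ' else if l = j then t.getD r ' ' else t.getD j ' ' := by
      intro j
      by_cases hjr : r = j
      · subst hjr
        simp [List.getD_eq_getElem?_getD, hr]
      · by_cases hjl : l = j
        · subst hjl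
          simp [List.getD_eq_getElem?_getD, hjr, (by omega : l < t.length)]
        · simp [List.getD_eq_getElem?_getD, hjr, hjl]
    split_ifs with h1 h2 h2
    · rw [hset]
      have hj : l + 1 + (r - 1) - i = l + r - i := by omega
      rw [hj]
      split_ifs with e1 e2
      · omega
      · omega
      · rfl
    · omega
    · rw [hset]
      rcases (by omega : i = l ∨ i = r) with rfl | rfl
      · rw [if_neg (by omega : ¬ r = i), if_pos rfl]
        congr 1
        omega
      · rw [if_pos rfl]
        congr 1
        omega
    · rw [hset, if_neg (by omega), if_neg (by omega)]

lemma reverseSubstring_eq (t : List Char) : reverseSubstring t = t.reverse := by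
  rcases ht : t with _ | ⟨c, ts⟩
  · unfold reverseSubstring; rw [swapLoop]; simp
  · rw [← ht]
    have hne : t.length ≠ 0 := by simp [ht]
    apply List.ext_getElem (by unfold reverseSubstring; rw [length_swapLoop, List.length_reverse])
    intro i h1 h2
    unfold reverseSubstring at h1 ⊢
    have hi : i < t.length := by rwa [length_swapLoop] at h1
    rw [← List.getD_eq_getElem _ ' ' h1, ← List.getD_eq_getElem _ ' ' h2]
    rw [swapLoop_getD t 0 (t.length - 1) (by omega) i]
    rw [if_pos ⟨Nat.zero_le _, by omega⟩]
    rw [List.getD_eq_getElem _ ' ' (by omega : 0 + (t.length - 1) - i < t.length),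
        List.getD_eq_getElem _ ' ' (by rwa [List.length_reverse])]
    rw [List.getElem_reverse]
    congr 1
    omega

lemma pyRange_pos_nil (a b st : Int) (hst : 0 < st) (hab : b ≤ a) :
    PySem.List.pyRange a b st = [] := by
  rw [PySem.List.pyRange_of_pos a b hst]
  simp [show ¬ a < b by omega]

lemma pyRange_pos_cons (a b st : Int) (hst : 0 < st) (hab : a < b) :
    PySem.List.pyRange a b st = a :: PySem.List.pyRange (a + st) b st := by
  rw [PySem.List.pyRange_of_pos a b hst, PySem.List.pyRange_of_pos (a + st) b hst]
  have hcount : ((b - a + st - 1) / st).toNat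
      = (if a + st < b then ((b - (a + st) + st - 1) / st).toNat else 0) + 1 := by
    split_ifs with h
    · have h1 : b - a + st - 1 = (b - (a + st) + st - 1) + 1 * st := by ring
      rw [h1, Int.add_mul_ediv_right _ _ (by omega)]
      have h2 : 0 ≤ (b - (a + st) + st - 1) / st := Int.ediv_nonneg (by omega) (by omega)
      omega
    · have h1 : PySem.Int.floordiv (b - a + st - 1) st = 1 := by
        rw [PySem.Int.floordiv_eq_iff_of_pos hst]
        constructor <;> nlinarith
      rw [PySem.Int.floordiv_eq_ediv_of_pos hst] at h1
      omega
  rw [if_pos hab, hcount, List.range_succ_eq_map]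
  simp only [List.map_cons, List.map_map]
  congr 1
  · simp
  · apply List.map_congr_left
    intro x _
    simp [Function.comp]
    ring

lemma sliceAssignRev_eq (pre tail : List Char) (kn : Nat) :
    sliceAssignRev (pre ++ tail) (pre.length : Int) (kn : Int)
      = pre ++ ((tail.take kn).reverse ++ tail.drop kn) := by
  unfold sliceAssignRev
  rw [reverseSubstring_eq]
  rw [PySem.List.slice_natCast_add (pre ++ tail) pre.length kn]
  rw [show ((pre.length : Int) + (kn : Int)) = ((pre.length + kn : Nat) : Int) by push_cast; ring]
  rw [PySem.List.slice_from_natCast]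
  rw [PySem.List.slice_zero_start, PySem.List.slice_to_natCast]
  rw [List.take_left' rfl, List.drop_left' rfl]
  rw [← List.drop_drop, List.drop_left' rfl]
  simp [List.append_assoc]

lemma pieceB_eq (pre tail : List Char) (kn : Nat) :
    pieceB (pre ++ tail) (kn : Int) (pre.length : Int)
      = (tail.take kn).reverse ++ (tail.drop kn).take kn := by
  unfold pieceB
  rw [PySem.List.slice_natCast_add (pre ++ tail) pre.length kn]
  rw [show ((pre.length : Int) + (kn : Int)) = ((pre.length + kn : Nat) : Int) by push_cast; ring]
  rw [show ((pre.length : Int)) + 2 * (kn : Int) = ((pre.length + kn : Nat) : Int) + (kn : Int) by push_cast; ring]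
  rw [PySem.List.slice_natCast_add (pre ++ tail) (pre.length + kn) kn]
  rw [List.drop_left' rfl, ← List.drop_drop, List.drop_left' rfl]

lemma foldlA (kn : Nat) (hk : 1 ≤ kn) (tail pre : List Char) :
    (PySem.List.pyRange pre.length (pre.length + tail.length) (2 * (kn : Int))).foldl
      (fun res cur => sliceAssignRev res cur (kn : Int)) (pre ++ tail)
    = pre ++ gB kn tail := by
  rcases htail : tail with _ | ⟨c, ts⟩
  · rw [pyRange_pos_nil _ _ _ (by omega) (by simp)]
    simp [gB]
  · rw [← htail]
    have hlen : 1 ≤ tail.length := by simp [htail]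
    rw [pyRange_pos_cons _ _ _ (by omega) (by omega), List.foldl_cons, sliceAssignRev_eq]
    have hsplit : (tail.take kn).reverse ++ tail.drop kn
        = ((tail.take kn).reverse ++ (tail.drop kn).take kn) ++ tail.drop (2 * kn) := by
      rw [List.append_assoc]
      congr 1
      rw [show 2 * kn = kn + kn by ring, ← List.drop_drop, List.take_append_drop]
    rw [hsplit, ← List.append_assoc]
    set pre' := pre ++ ((tail.take kn).reverse ++ (tail.drop kn).take kn) with hpre'
    have hgB : gB kn tail = ((tail.take kn).reverse ++ (tail.drop kn).take kn) ++ gB kn (tail.drop (2 * kn)) := by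
      rw [htail]
      show gB kn (c :: ts) = _
      rw [gB]
      have hd : ts.drop (2 * kn - 1) = (c :: ts).drop (2 * kn) := by
        obtain ⟨m, hm⟩ : ∃ m, 2 * kn = m + 1 := ⟨2 * kn - 1, by omega⟩
        rw [hm]
        simp
      rw [hd]
    by_cases hlong : 2 * kn < tail.length
    · have hplen : pre'.length = pre.length + 2 * kn := by
        simp [hpre']
        omega
      have harg1 : (pre.length : Int) + 2 * (kn : Int) = (pre'.length : Int) := by
        rw [hplen]; push_cast; ring
      have harg2 : ((pre.length : Int)) + (tail.length : Int) = (pre'.length : Int) + ((tail.drop (2 * kn)).length : Int) := by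
        have hld : (tail.drop (2 * kn)).length = tail.length - 2 * kn := by simp
        omega
      rw [harg1, harg2, foldlA kn hk (tail.drop (2 * kn)) pre']
      rw [hgB, hpre', List.append_assoc]
    · rw [pyRange_pos_nil ((pre.length : Int) + 2 * (kn : Int)) ((pre.length : Int) + (tail.length : Int)) (2 * (kn : Int)) (by omega) (by omega), List.foldl_nil]
      have hnil : tail.drop (2 * kn) = [] := List.drop_eq_nil_of_le (by omega)
      have htk : (tail.drop kn).take kn = tail.drop kn := List.take_of_length_le (by simp; omega)
      rw [hgB, hnil, hpre', htk]
      simp [gB]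
termination_by tail.length
decreasing_by simp [htail] at hlong ⊢; omega

lemma mapB (kn : Nat) (hk : 1 ≤ kn) (tail pre : List Char) :
    ((PySem.List.pyRange pre.length (pre.length + tail.length) (2 * (kn : Int))).map
      (pieceB (pre ++ tail) (kn : Int))).flatten
    = gB kn tail := by
  rcases htail : tail with _ | ⟨c, ts⟩
  · rw [pyRange_pos_nil _ _ _ (by omega) (by simp)]
    simp [gB]
  · rw [← htail]
    have hlen : 1 ≤ tail.length := by simp [htail]
    rw [pyRange_pos_cons _ _ _ (by omega) (by omega), List.map_cons, List.flatten_cons, pieceB_eq]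
    have hgB : gB kn tail = ((tail.take kn).reverse ++ (tail.drop kn).take kn) ++ gB kn (tail.drop (2 * kn)) := by
      rw [htail]
      show gB kn (c :: ts) = _
      rw [gB]
      have hd : ts.drop (2 * kn - 1) = (c :: ts).drop (2 * kn) := by
        obtain ⟨m, hm⟩ : ∃ m, 2 * kn = m + 1 := ⟨2 * kn - 1, by omega⟩
        rw [hm]
        simp
      rw [hd]
    set pre' := pre ++ tail.take (2 * kn) with hpre'
    have hsplit : pre ++ tail = pre' ++ tail.drop (2 * kn) := by
      rw [hpre', List.append_assoc, List.take_append_drop]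
    by_cases hlong : 2 * kn < tail.length
    · have hplen : pre'.length = pre.length + 2 * kn := by
        simp [hpre']
        omega
      have harg1 : (pre.length : Int) + 2 * (kn : Int) = (pre'.length : Int) := by
        rw [hplen]; push_cast; ring
      have harg2 : ((pre.length : Int)) + (tail.length : Int) = (pre'.length : Int) + ((tail.drop (2 * kn)).length : Int) := by
        have hld : (tail.drop (2 * kn)).length = tail.length - 2 * kn := by simp
        omega
      rw [harg1, harg2, hsplit, mapB kn hk (tail.drop (2 * kn)) pre']
      rw [hgB]
    · rw [pyRange_pos_nil ((pre.length : Int) + 2 * (kn : Int)) ((pre.length : Int) + (tail.length : Int)) (2 * (kn : Int)) (by omega) (by omega)]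
      have hnil : tail.drop (2 * kn) = [] := List.drop_eq_nil_of_le (by omega)
      rw [hgB, hnil]
      simp [gB]
termination_by tail.length
decreasing_by simp [htail] at hlong ⊢; omega

-- ===== VERDICT (by name: the statement is the Claim_ definition above) =====
theorem reverseStr2_spec : Claim_equal_reverseStr2 := by
  intro s k _hdom hk
  have hk1 : 1 ≤ k := hk
  unfold Spec_reverseStr2 reverseStr2 reverseStr2_alt
  obtain ⟨kn, rfl, hkn⟩ : ∃ kn : Nat, k = (kn : Int) ∧ 1 ≤ kn :=
    ⟨k.toNat, by omega, by omega⟩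
  have hA := foldlA kn hkn s.toList []
  have hB := mapB kn hkn s.toList []
  simp only [List.nil_append, List.length_nil, Nat.cast_zero, zero_add] at hA hB
  rw [hA, hB]
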